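-- pv_equiv track=rewrite | github.com/Singularity0909/wechat-bot | util/log.py | get_nickname_by_log
-- ===== SOURCE A (Python) =====
-- def get_nickname_by_log(line):
--     len_ = len(line)
--     idx_left, idx_right = 0, len_ - 3
--     count = 0
--     for idx in range(len(line)):
--         if line[idx] == ' ':
--             count += 1
--             if count == 2:
--                 idx_left = idx + 1
--                 break
--     return line[idx_left:idx_right + 1]
-- ===== SOURCE B (Python) =====
-- def get_nickname_by_log(line):
--     buf = []
--     seen = 0
--     for ch in line:
--         if ch == ' ' and seen < 2:
--             seen += 1
--             if seen == 2:
--                 buf = []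
--                 continue
--         buf.append(ch)
--     return ''.join(buf[:-2])
-- ===== Notes on version B (the rewrite author's own statement) =====
-- stated objective: alternative
-- what changed: Replaces A's index scan (find the second space, then slice the original string by computed bounds) with a one-pass state-machine fold that builds the output buffer character by character, resetting the buffer when the second space is consumed, then drops the last two buffered characters.
import Mathlib
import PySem

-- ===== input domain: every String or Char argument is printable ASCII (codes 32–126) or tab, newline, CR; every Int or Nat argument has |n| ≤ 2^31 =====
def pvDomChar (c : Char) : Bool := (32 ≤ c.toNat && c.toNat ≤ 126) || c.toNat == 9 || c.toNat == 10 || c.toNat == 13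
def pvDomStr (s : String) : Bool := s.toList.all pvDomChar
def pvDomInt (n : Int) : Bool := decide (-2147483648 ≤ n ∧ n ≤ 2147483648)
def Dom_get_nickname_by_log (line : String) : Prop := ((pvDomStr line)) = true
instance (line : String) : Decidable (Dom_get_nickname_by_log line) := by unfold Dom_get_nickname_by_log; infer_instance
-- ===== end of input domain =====

-- B replaces A's index scan + slice by a one-pass state-machine fold that builds the output buffer,
-- resetting it at the second space (objective: alternative, same cost).

-- ===== PORT A =====
-- the for-idx loop of A with its break: scan for the second space, returning idx_left (0 if never found)
def pvAScan : List Char → Nat → Nat → Nat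
  | [], _, _ => 0
  | c :: rest, idx, count =>
    if c = ' ' then
      if count + 1 = 2 then idx + 1
      else pvAScan rest (idx + 1) (count + 1)
    else pvAScan rest (idx + 1) count

def get_nickname_by_log (line : String) : String :=
  let len_ : Int := PySem.Str.len line
  let idx_right : Int := len_ - 3
  let idx_left : Int := (pvAScan line.toList 0 0 : Int)
  PySem.Str.slice line (some idx_left) (some (idx_right + 1))

-- ===== PORT B =====
-- B's loop body: state (buf, seen); a space while seen < 2 bumps seen and, at the second space,
-- clears the buffer (the Python 'continue'); every other character is appended to buf.
def pvBStep (st : List Char × Nat) (ch : Char) : List Char × Nat :=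
  if ch = ' ' ∧ st.2 < 2 then
    if st.2 + 1 = 2 then ([], st.2 + 1) else (st.1 ++ [ch], st.2 + 1)
  else (st.1 ++ [ch], st.2)

def get_nickname_by_log_alt (line : String) : String :=
  let st := line.toList.foldl pvBStep ([], 0)
  -- ''.join(buf[:-2])
  String.ofList (PySem.List.slice st.1 none (some (-2)))

-- ===== PRECONDITION & SPEC =====
def Spec_get_nickname_by_log (line : String) (out : String) : Prop := out = get_nickname_by_log_alt line
instance (line : String) (out : String) : Decidable (Spec_get_nickname_by_log line out) := by unfold Spec_get_nickname_by_log; infer_instance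

-- ===== CLAIM (what is proved, stated in full; the proofs are below) =====
def Claim_equal_get_nickname_by_log : Prop := ∀ (line : String), Dom_get_nickname_by_log line → Spec_get_nickname_by_log line (get_nickname_by_log line)

-- ===== LEMMAS AND PROOFS =====

-- decomposition at the first space
theorem pv_space_decomp (cs : List Char) (h : ' ' ∈ cs) :
    cs = cs.takeWhile (· ≠ ' ') ++ ' ' :: (cs.dropWhile (· ≠ ' ')).tail := by
  induction cs with
  | nil => simp at h
  | cons c rest ih =>
    by_cases hc : c = ' '
    · subst hc; simp [List.takeWhile, List.dropWhile]
    · have hm : ' ' ∈ rest := by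
        rcases List.mem_cons.mp h with h1 | h1
        · exact absurd h1.symm hc
        · exact h1
      simp only [List.takeWhile_cons, List.dropWhile_cons]
      simp [hc]
      simpa using ih hm

-- A's scan, one space already counted
theorem pv_aScan_one (cs : List Char) : ∀ (idx : Nat),
    pvAScan cs idx 1 = if ' ' ∈ cs then idx + (cs.takeWhile (· ≠ ' ')).length + 1 else 0 := by
  induction cs with
  | nil => intro idx; simp [pvAScan]
  | cons c rest ih =>
    intro idx
    by_cases hc : c = ' '
    · subst hc; simp [pvAScan, List.takeWhile]
    · have hstep : pvAScan (c :: rest) idx 1 = pvAScan rest (idx + 1) 1 := by simp [pvAScan, hc]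
      rw [hstep, ih (idx + 1)]
      by_cases hmm : ' ' ∈ rest
      · simp [hmm, hc, List.takeWhile_cons]
        omega
      · simp [hmm, Ne.symm hc]

-- A's scan from the start
theorem pv_aScan_zero (cs : List Char) : ∀ (idx : Nat),
    pvAScan cs idx 0 =
      if ' ' ∈ cs then
        (if ' ' ∈ (cs.dropWhile (· ≠ ' ')).tail then
          idx + (cs.takeWhile (· ≠ ' ')).length + 1
            + (((cs.dropWhile (· ≠ ' ')).tail).takeWhile (· ≠ ' ')).length + 1
        else 0)
      else 0 := by
  induction cs with
  | nil => intro idx; simp [pvAScan]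
  | cons c rest ih =>
    intro idx
    by_cases hc : c = ' '
    · subst hc
      have hstep : pvAScan (' ' :: rest) idx 0 = pvAScan rest (idx + 1) 1 := by simp [pvAScan]
      rw [hstep, pv_aScan_one rest (idx + 1)]
      by_cases hm : ' ' ∈ rest <;> simp [hm, List.takeWhile, List.dropWhile]
    · have hstep : pvAScan (c :: rest) idx 0 = pvAScan rest (idx + 1) 0 := by simp [pvAScan, hc]
      rw [hstep, ih (idx + 1)]
      by_cases hmm : ' ' ∈ rest
      · by_cases hm2 : ' ' ∈ (List.dropWhile (fun x => !decide (x = ' ')) rest).tail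
        · simp [hmm, hm2, hc, List.takeWhile_cons, List.dropWhile_cons]
          omega
        · simp [hmm, hm2, hc, List.dropWhile_cons]
      · simp [hmm, Ne.symm hc]

-- B's fold once both spaces have been consumed: pure append
theorem pv_fold2 (cs : List Char) : ∀ (buf : List Char),
    cs.foldl pvBStep (buf, 2) = (buf ++ cs, 2) := by
  induction cs with
  | nil => intro buf; simp
  | cons c rest ih =>
    intro buf
    have : pvBStep (buf, 2) c = (buf ++ [c], 2) := by simp [pvBStep]
    simp [List.foldl_cons, this, ih]

-- B's fold with one space already seen
theorem pv_fold1 (cs : List Char) : ∀ (buf : List Char),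
    cs.foldl pvBStep (buf, 1) =
      if ' ' ∈ cs then ((cs.dropWhile (· ≠ ' ')).tail, 2) else (buf ++ cs, 1) := by
  induction cs with
  | nil => intro buf; simp
  | cons c rest ih =>
    intro buf
    by_cases hc : c = ' '
    · subst hc
      have : pvBStep (buf, 1) ' ' = ([], 2) := by simp [pvBStep]
      simp [List.foldl_cons, this, pv_fold2, List.dropWhile]
    · have : pvBStep (buf, 1) c = (buf ++ [c], 1) := by simp [pvBStep, hc]
      rw [List.foldl_cons, this, ih (buf ++ [c])]
      by_cases hm : ' ' ∈ rest <;> simp [hm, hc, Ne.symm hc, List.dropWhile_cons]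

-- B's fold from the start state
theorem pv_fold0 (cs : List Char) : ∀ (buf : List Char),
    cs.foldl pvBStep (buf, 0) =
      if ' ' ∈ cs then
        (if ' ' ∈ (cs.dropWhile (· ≠ ' ')).tail then
          ((((cs.dropWhile (· ≠ ' ')).tail).dropWhile (· ≠ ' ')).tail, 2)
        else (buf ++ cs, 1))
      else (buf ++ cs, 0) := by
  induction cs with
  | nil => intro buf; simp
  | cons c rest ih =>
    intro buf
    by_cases hc : c = ' '
    · subst hc
      have hstep : pvBStep (buf, 0) ' ' = (buf ++ [' '], 1) := by simp [pvBStep]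
      rw [List.foldl_cons, hstep, pv_fold1 rest (buf ++ [' '])]
      by_cases hm : ' ' ∈ rest <;> simp [hm, List.dropWhile]
    · have hstep : pvBStep (buf, 0) c = (buf ++ [c], 0) := by simp [pvBStep, hc]
      rw [List.foldl_cons, hstep, ih (buf ++ [c])]
      by_cases hm : ' ' ∈ rest
      · by_cases hm2 : ' ' ∈ (List.dropWhile (fun x => !decide (x = ' ')) rest).tail <;>
          simp [hm, hm2, hc, Ne.symm hc, List.dropWhile_cons]
      · simp [hm, Ne.symm hc]

-- Python slice xs[k : n-2] for a Nat start k ≤ n = xs.length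
theorem pv_slice_k_nm2 (cs : List Char) (k : Nat) (hk : k ≤ cs.length) :
    PySem.List.slice cs (some (k : Int)) (some ((cs.length : Int) - 2)) =
      (cs.drop k).take (cs.length - 2 - k) := by
  have h1 : PySem.List.clampIdx cs.length (k : Int) = k := by
    unfold PySem.List.clampIdx
    rw [if_neg (by omega)]
    rw [Int.toNat_natCast]
    omega
  have h2 : PySem.List.clampIdx cs.length ((cs.length : Int) - 2) = cs.length - 2 := by
    unfold PySem.List.clampIdx
    split_ifs with ha hb
    · omega
    · omega
    · rw [show ((cs.length : Int) - 2) = ((cs.length - 2 : Nat) : Int) by omega, Int.toNat_natCast]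
      omega
  simp only [PySem.List.slice, h1, h2]

-- Python slice s[:-2] as take
theorem pv_slice_neg2 (cs : List Char) :
    PySem.List.slice cs none (some (-2)) = cs.take (cs.length - 2) := by
  have := PySem.List.slice_to_neg_ofNat cs 2 (by omega)
  simpa using this

-- ===== VERDICT (by name: the statement is the Claim_ definition above) =====
set_option maxHeartbeats 1000000 in
theorem get_nickname_by_log_spec : Claim_equal_get_nickname_by_log := by
  intro line _
  unfold Spec_get_nickname_by_log get_nickname_by_log get_nickname_by_log_alt
  set cs := line.toList with hcs
  have hAchars : (PySem.Str.slice line (some ((pvAScan cs 0 0 : Nat) : Int))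
      (some ((PySem.Str.len line) - 3 + 1))).toList
      = PySem.List.slice cs (some ((pvAScan cs 0 0 : Nat) : Int)) (some ((cs.length : Int) - 2)) := by
    have : (PySem.Str.len line) - 3 + 1 = (cs.length : Int) - 2 := by
      simp [PySem.Str.len, hcs]; ring
    rw [this]
    simp [PySem.Str.toList_slice, PySem.Chars.slice_eq_listSlice, hcs]
  apply String.toList_injective
  rw [hAchars, pv_aScan_zero cs 0, pv_fold0 cs []]
  dsimp only
  by_cases hm : ' ' ∈ cs
  · by_cases hm2 : ' ' ∈ ((cs.dropWhile (· ≠ ' ')).tail)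
    · -- two or more spaces
      set w1 := cs.takeWhile (· ≠ ' ') with hw1
      set r1 := (cs.dropWhile (· ≠ ' ')).tail with hr1
      set w2 := r1.takeWhile (· ≠ ' ') with hw2
      set rest := (r1.dropWhile (· ≠ ' ')).tail with hrest
      rw [if_pos hm, if_pos hm2, if_pos hm, if_pos hm2]
      have hd1 : cs = w1 ++ ' ' :: r1 := pv_space_decomp cs hm
      have hd2 : r1 = w2 ++ ' ' :: rest := pv_space_decomp r1 hm2
      have hk : 0 + w1.length + 1 + w2.length + 1 ≤ cs.length := by
        rw [hd1, hd2]; simp; omega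
      have hflat : cs = (w1 ++ ' ' :: w2 ++ [' ']) ++ rest := by
        rw [hd1, hd2]; simp
      have hdrop : cs.drop (0 + w1.length + 1 + w2.length + 1) = rest := by
        rw [hflat, show 0 + w1.length + 1 + w2.length + 1 = (w1 ++ ' ' :: w2 ++ [' ']).length by
          simp; omega]
        exact List.drop_left
      rw [pv_slice_k_nm2 cs _ hk, hdrop]
      have hlen : cs.length = w1.length + 1 + w2.length + 1 + rest.length := by
        rw [hd1, hd2]; simp; omega
      rw [pv_slice_neg2]
      simp only [String.toList_ofList]
      congr 1
      omega
    · -- exactly one space: idx_left = 0, buf = cs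
      rw [if_pos hm, if_neg hm2, if_pos hm, if_neg hm2]
      dsimp only
      rw [pv_slice_k_nm2 cs 0 (by omega), pv_slice_neg2]
      simp
  · -- no space: idx_left = 0, buf = cs
    rw [if_neg hm, if_neg hm]
    dsimp only
    rw [pv_slice_k_nm2 cs 0 (by omega), pv_slice_neg2]
    simp
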